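-- pv_equiv track=rewrite | github.com/felipeLx/python | test_python/test_py5.py | all_non_repeting
-- ===== SOURCE A (Python) =====
-- def all_non_repeting(string):
--     string = string.replace(' ', '').lower()
--     char_count = {}
--
--     for c in string:
--         if c in char_count:
--             char_count[c] += 1
--         else:
--             char_count[c] = 1
--
--     all_unique = []
--     y = sorted(char_count.items(), key=lambda x: x[1])
--
--     for item in y:
--         if item[1] == y[0][1]:
--             all_unique.append(item)
--
--     return all_unique
-- ===== SOURCE B (Python) =====
-- def all_non_repeting(string):
--     string = string.replace(' ', '').lower()
--     counts = {}
--     for c in string: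
--         counts[c] = counts.get(c, 0) + 1
--     if not counts:
--         return []
--     m = min(counts.values())
--     return [(c, n) for c, n in counts.items() if n == m]
-- ===== Notes on version B (the rewrite author's own statement) =====
-- stated objective: simpler
-- what changed: Replaces A's sort-of-all-items-then-filter-against-y[0] with a single min pass over the counts followed by a filter of the dict items in insertion order (the stable sort makes both orders identical).
import Mathlib
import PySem

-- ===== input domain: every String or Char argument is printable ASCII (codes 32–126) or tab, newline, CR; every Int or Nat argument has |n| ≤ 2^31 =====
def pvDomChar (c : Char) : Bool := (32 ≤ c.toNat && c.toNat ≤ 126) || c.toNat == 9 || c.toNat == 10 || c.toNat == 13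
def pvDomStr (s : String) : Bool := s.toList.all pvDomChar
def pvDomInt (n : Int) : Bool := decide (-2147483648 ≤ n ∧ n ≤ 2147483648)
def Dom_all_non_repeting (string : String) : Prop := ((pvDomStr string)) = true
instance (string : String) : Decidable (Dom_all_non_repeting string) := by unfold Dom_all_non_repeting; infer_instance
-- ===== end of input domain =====

-- B replaces A's sort-then-filter-against-y[0] with a single min pass and an insertion-order filter (simpler; identical return value).

-- ===== PORT A =====
def all_non_repeting (string : String) : List (String × Int) :=
  let s := PySem.Str.lower (PySem.Str.replace string " " "")
  let char_count : PySem.Dict String Int :=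
    s.toList.foldl (fun d c =>
      if d.contains (String.mk [c]) then d.modify (String.mk [c]) 0 (· + 1)
      else d.insert (String.mk [c]) 1) PySem.Dict.empty
  let y := PySem.List.sorted char_count.items (fun x => x.2)
  y.foldl (fun all_unique item =>
      if item.2 = (PySem.List.pyGetD y 0 ("", 0)).2 then all_unique ++ [item] else all_unique) []

-- ===== PORT B =====
def all_non_repeting_alt (string : String) : List (String × Int) :=
  let s := PySem.Str.lower (PySem.Str.replace string " " "")
  let counts : PySem.Dict String Int :=
    (s.toList.map (fun c => String.mk [c])).foldl
      (fun d c => d.insert c (d.getD c 0 + 1)) PySem.Dict.empty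
  if counts.items = [] then []
  else
    match PySem.List.min? counts.values (fun v => v) with
    | some m => counts.items.filter (fun p => decide (p.2 = m))
    | none => []

-- ===== PRECONDITION & SPEC =====
def Spec_all_non_repeting (string : String) (out : List (String × Int)) : Prop := out = all_non_repeting_alt string
instance (string : String) (out : List (String × Int)) : Decidable (Spec_all_non_repeting string out) := by unfold Spec_all_non_repeting; infer_instance

-- ===== CLAIM (what is proved, stated in full; the proofs are below) =====
def Claim_equal_all_non_repeting : Prop := ∀ (string : String), Dom_all_non_repeting string → Spec_all_non_repeting string (all_non_repeting string)

-- ===== LEMMAS AND PROOFS =====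

-- Inserting x into a key-ordered list acc whose keys are all ≥ m moves x (when key x = m) past exactly the
-- m-keyed prefix, so the m-filter gains x at the end.
theorem insertBy_filter_min {α : Type} (key : α → Int) (m : Int) (x : α) (acc : List α)
    (hp : acc.Pairwise (fun a b => key a ≤ key b)) (hmin : ∀ y ∈ acc, m ≤ key y) :
    (PySem.List.insertBy (fun a b => decide (key a < key b)) x acc).filter (fun z => decide (key z = m))
      = acc.filter (fun z => decide (key z = m)) ++ (if key x = m then [x] else []) := by
  induction acc with
  | nil => by_cases h : key x = m <;> simp [PySem.List.insertBy, List.filter, h]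
  | cons y ys ih =>
    rw [List.pairwise_cons] at hp
    simp only [PySem.List.insertBy]
    by_cases hlt : key x < key y
    · simp only [hlt, decide_true, if_true]
      by_cases hxm : key x = m
      · have hys : ∀ z ∈ y :: ys, ¬ key z = m := by
          intro z hz
          rcases List.mem_cons.1 hz with rfl | hz'
          · omega
          · have := hp.1 z hz'; omega
        have h1 : (y :: ys).filter (fun z => decide (key z = m)) = [] := by
          rw [List.filter_eq_nil_iff]; intro z hz; simpa using hys z hz
        rw [List.filter_cons, h1]
        simp [hxm]
      · rw [List.filter_cons]
        simp [hxm]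
    · simp only [hlt, decide_false, Bool.false_eq_true, if_false]
      rw [List.filter_cons, List.filter_cons, ih hp.2 (fun z hz => hmin z (by simp [hz]))]
      split <;> simp

-- Filtering the stable sort at the minimum key gives the filter of the original list (order preserved).
theorem sorted_filter_min {α : Type} (l : List α) (key : α → Int) (m : Int)
    (hmin : ∀ y ∈ l, m ≤ key y) :
    (PySem.List.sorted l key).filter (fun z => decide (key z = m))
      = l.filter (fun z => decide (key z = m)) := by
  induction l using List.reverseRecOn with
  | nil => rfl
  | append_singleton l x ih =>
    rw [PySem.List.sorted_eq_foldl_insertBy, List.foldl_append, List.foldl_cons, List.foldl_nil,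
      ← PySem.List.sorted_eq_foldl_insertBy,
      insertBy_filter_min key m x _ (PySem.List.sorted_pairwise l key)
        (fun y hy => hmin y (List.mem_append_left _ ((PySem.List.mem_sorted l key false y).1 hy))),
      ih (fun y hy => hmin y (by simp [hy])), List.filter_append]
    by_cases hxm : key x = m <;> simp [hxm]

theorem core (l : List (String × Int)) :
    (PySem.List.sorted l (fun x => x.2)).foldl
        (fun acc item =>
          if item.2 = (PySem.List.pyGetD (PySem.List.sorted l (fun x => x.2)) 0 ("", 0)).2
          then acc ++ [item] else acc) []
      = (if l = [] then []
         else match PySem.List.min? (l.map (·.2)) (fun v => v) with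
           | some m => l.filter (fun p => decide (p.2 = m))
           | none => []) := by
  by_cases hl : l = []
  · subst hl; rfl
  · rw [if_neg hl]
    rcases hsy : PySem.List.sorted l (fun x => x.2) false with _ | ⟨m0, t⟩
    · exact absurd ((PySem.List.sorted_eq_nil_iff l (fun x => x.2) false).1 hsy) hl
    · rcases hm : PySem.List.min? (l.map (·.2)) (fun v => v) with _ | m
      · exact absurd ((PySem.List.min?_eq_none_iff (l.map (·.2)) (fun v => v)).1 hm)
          (by simpa using hl)
      · have hget : PySem.List.pyGetD (m0 :: t) 0 ("", 0) = m0 := by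
          simp [PySem.List.pyGetD, PySem.List.pyGet?, PySem.List.pyIdx?]
        have hmin : ∀ p ∈ l, m ≤ p.2 := by
          intro p hp
          simpa using PySem.List.min?_isMin hm p.2 (List.mem_map_of_mem hp)
        have hm0 : m0.2 = m := by
          have h1 : m ≤ m0.2 :=
            hmin m0 ((PySem.List.mem_sorted l (fun x => x.2) false m0).1 (hsy ▸ List.mem_cons_self))
          have h2 : m0.2 ≤ m := by
            rcases List.mem_map.1 (PySem.List.min?_mem hm) with ⟨p, hp, hpm⟩
            have hle : m0.2 ≤ p.2 := by
              simpa using PySem.List.key_head_sorted_le l (fun x => x.2) hsy p hp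
            omega
          omega
        rw [hget, hm]
        have hfold2 : (m0 :: t).foldl
            (fun acc item => if item.2 = m0.2 then acc ++ [item] else acc) []
            = (m0 :: t).filter (fun item => decide (item.2 = m0.2)) := by
          simpa using PySem.List.foldl_append_if
            (fun (item : String × Int) => decide (item.2 = m0.2)) (fun item => item) (m0 :: t) []
        rw [hfold2, hm0, ← hsy]
        exact sorted_filter_min l (fun x => x.2) m hmin

-- Tails of the two ports, as functions of the finished count dictionary (proof helpers).
def aTail (d : PySem.Dict String Int) : List (String × Int) :=
  let y := PySem.List.sorted d.items (fun x => x.2)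
  y.foldl (fun all_unique item =>
      if item.2 = (PySem.List.pyGetD y 0 ("", 0)).2 then all_unique ++ [item] else all_unique) []

def bTail (d : PySem.Dict String Int) : List (String × Int) :=
  if d.items = [] then []
  else
    match PySem.List.min? d.values (fun v => v) with
    | some m => d.items.filter (fun p => decide (p.2 = m))
    | none => []

theorem tails_eq (d : PySem.Dict String Int) : aTail d = bTail d := core d.items

theorem dicts_eq (cs : List Char) (d : PySem.Dict String Int) :
    cs.foldl (fun d c =>
        if d.contains (String.mk [c]) then d.modify (String.mk [c]) 0 (· + 1)
        else d.insert (String.mk [c]) 1) d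
      = (cs.map (fun c => String.mk [c])).foldl (fun d c => d.insert c (d.getD c 0 + 1)) d := by
  induction cs generalizing d with
  | nil => rfl
  | cons c cs ih =>
    simp only [List.foldl_cons, List.map_cons]
    have hstep : (if d.contains (String.mk [c]) then d.modify (String.mk [c]) 0 (· + 1)
        else d.insert (String.mk [c]) 1)
        = d.insert (String.mk [c]) (d.getD (String.mk [c]) 0 + 1) := by
      by_cases h : d.contains (String.mk [c])
      · simp [h, PySem.Dict.modify]
      · rw [if_neg (by simp [h]), PySem.Dict.getD_of_not_contains d 0 (by simpa using h)]
        norm_num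
    rw [hstep]
    exact ih _

-- ===== VERDICT (by name: the statement is the Claim_ definition above) =====
theorem all_non_repeting_spec : Claim_equal_all_non_repeting := by
  intro s _
  show all_non_repeting s = all_non_repeting_alt s
  calc all_non_repeting s
      = aTail ((PySem.Str.lower (PySem.Str.replace s " " "")).toList.foldl (fun d c =>
          if d.contains (String.mk [c]) then d.modify (String.mk [c]) 0 (· + 1)
          else d.insert (String.mk [c]) 1) PySem.Dict.empty) := rfl
    _ = bTail ((PySem.Str.lower (PySem.Str.replace s " " "")).toList.foldl (fun d c =>
          if d.contains (String.mk [c]) then d.modify (String.mk [c]) 0 (· + 1)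
          else d.insert (String.mk [c]) 1) PySem.Dict.empty) := tails_eq _
    _ = bTail (((PySem.Str.lower (PySem.Str.replace s " " "")).toList.map (fun c => String.mk [c])).foldl
          (fun d c => d.insert c (d.getD c 0 + 1)) PySem.Dict.empty) :=
        congrArg bTail (dicts_eq _ _)
    _ = all_non_repeting_alt s := rfl
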